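-- pv_equiv track=rewrite | github.com/C355Team/Connect6 | AI_connect6.py | horiz_score
-- ===== SOURCE A (Python) =====
-- length = 19
--
-- def horiz_score(board, player):
--
--     max_length, multiples = 0, 0
--     for row in board:
--         for i in range(length - 5):
--             six_tiles = [tile for tile in row[i:i+6]]
--             if opponent(player) not in six_tiles:
--                 player_count = six_tiles.count(player)
--                 if player_count > max_length:
--                     max_length = player_count
--                     multiples = 1
--                 elif player_count == max_length:
--                     multiples += 1
--
--     return [max_length, multiples]
--
-- def opponent(player):
--     if player == 'X':
--         return 'O'
--     else:
--         return 'X'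
-- ===== SOURCE B (Python) =====
-- length = 19
--
-- def horiz_score(board, player):
--     opp = 'O' if player == 'X' else 'X'
--     max_length, multiples = 0, 0
--     for row in board:
--         n = len(row)
--         # prefix-count tables: pp[j] / po[j] = occurrences of player / opponent in row[:j]
--         pp, po = [0], [0]
--         for t in row:
--             pp.append(pp[-1] + (t == player))
--             po.append(po[-1] + (t == opp))
--         for i in range(length - 5):
--             s, e = min(i, n), min(i + 6, n)
--             if po[e] == po[s]:
--                 pc = pp[e] - pp[s]
--                 if pc > max_length:
--                     max_length, multiples = pc, 1
--                 elif pc == max_length: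
--                     multiples += 1
--     return [max_length, multiples]
-- ===== Notes on version B (the rewrite author's own statement) =====
-- stated objective: alternative
-- what changed: Replaced A's per-window slice, membership scan and count with per-row prefix-count tables for player and opponent built in one pass, each window then judged by two subtractions (opponent absent iff its prefix counts at the window ends are equal).
import Mathlib
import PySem

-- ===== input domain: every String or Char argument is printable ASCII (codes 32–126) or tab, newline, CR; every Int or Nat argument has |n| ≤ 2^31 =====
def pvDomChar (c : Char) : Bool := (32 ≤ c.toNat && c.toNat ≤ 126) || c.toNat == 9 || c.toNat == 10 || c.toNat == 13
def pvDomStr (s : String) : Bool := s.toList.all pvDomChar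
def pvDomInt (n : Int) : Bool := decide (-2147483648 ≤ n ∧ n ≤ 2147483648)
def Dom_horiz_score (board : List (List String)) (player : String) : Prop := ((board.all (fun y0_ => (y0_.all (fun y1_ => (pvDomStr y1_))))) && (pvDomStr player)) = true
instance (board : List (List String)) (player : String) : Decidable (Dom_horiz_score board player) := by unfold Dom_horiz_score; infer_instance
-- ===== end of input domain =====

-- B replaces A's per-window slice-and-scan with per-row prefix-count tables and a
-- subtraction per window (alternative decomposition; same asymptotic cost at fixed length 19).


-- ===== PORT A =====
def opponent (player : String) : String := if player == "X" then "O" else "X"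

def horiz_score (board : List (List String)) (player : String) : List Int :=
  let st : Int × Int := board.foldl (fun st row =>
    (PySem.List.pyRange 0 (19 - 5) 1).foldl (fun st i =>
      let six_tiles := PySem.List.slice row (some i) (some (i + 6))
      if six_tiles.contains (opponent player) = false then
        let player_count : Int := PySem.List.count six_tiles player
        if player_count > st.1 then (player_count, 1)
        else if player_count == st.1 then (st.1, st.2 + 1)
        else st
      else st) st) ((0 : Int), (0 : Int))
  [st.1, st.2]

-- ===== PORT B =====
def horiz_score_alt (board : List (List String)) (player : String) : List Int :=
  let opp := if player == "X" then "O" else "X"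
  let st : Int × Int := board.foldl (fun st row =>
    let n : Int := row.length
    -- prefix-count tables pp/po, built in one pass appending pp[-1] + (t == …)
    let prefs : List Int × List Int := row.foldl (fun pr t =>
        (pr.1 ++ [pr.1.getLast! + (if t == player then 1 else 0)],
         pr.2 ++ [pr.2.getLast! + (if t == opp then 1 else 0)])) ([0], [0])
    (PySem.List.pyRange 0 (19 - 5) 1).foldl (fun st i =>
      let s := min i n
      let e := min (i + 6) n
      if PySem.List.pyGetD prefs.2 e 0 == PySem.List.pyGetD prefs.2 s 0 then
        let pc := PySem.List.pyGetD prefs.1 e 0 - PySem.List.pyGetD prefs.1 s 0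
        if pc > st.1 then (pc, 1)
        else if pc == st.1 then (st.1, st.2 + 1)
        else st
      else st) st) ((0 : Int), (0 : Int))
  [st.1, st.2]

-- ===== PRECONDITION & SPEC =====
def Spec_horiz_score (board : List (List String)) (player : String) (out : List Int) : Prop := out = horiz_score_alt board player
instance (board : List (List String)) (player : String) (out : List Int) : Decidable (Spec_horiz_score board player out) := by unfold Spec_horiz_score; infer_instance

-- ===== CLAIM (what is proved, stated in full; the proofs are below) =====
def Claim_equal_horiz_score : Prop := ∀ (board : List (List String)) (player : String), Dom_horiz_score board player → Spec_horiz_score board player (horiz_score board player)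

-- ===== LEMMAS AND PROOFS =====

-- the intended contents of B's prefix tables: entry j counts t in row[:j]
def prefTable (row : List String) (t : String) : List Int :=
  (List.range (row.length + 1)).map (fun j => ((row.take j).count t : Int))

theorem prefTable_append (row : List String) (x t : String) :
    prefTable (row ++ [x]) t
      = prefTable row t ++ [(row.count t : Int) + (if x == t then 1 else 0)] := by
  unfold prefTable
  rw [show (row ++ [x]).length + 1 = (row.length + 1) + 1 by simp]
  rw [List.range_succ, List.map_append]
  congr 1
  · apply List.map_congr_left
    intro j hj
    simp only [List.mem_range] at hj
    rw [List.take_append_of_le_length (by omega)]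
  · simp only [List.map_singleton]
    rw [List.take_of_length_le (by simp)]
    by_cases h : x = t
    · subst h; simp [List.count_append]
    · simp [List.count_append, h]

theorem getLast!_prefTable (row : List String) (t : String) :
    (prefTable row t).getLast! = (row.count t : Int) := by
  unfold prefTable
  rw [List.range_succ, List.map_append]
  simp

theorem prefs_eq (row : List String) (p o : String) :
    row.foldl (fun (pr : List Int × List Int) t =>
        (pr.1 ++ [pr.1.getLast! + (if t == p then 1 else 0)],
         pr.2 ++ [pr.2.getLast! + (if t == o then 1 else 0)])) ([0], [0])
      = (prefTable row p, prefTable row o) := by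
  induction row using List.reverseRecOn with
  | nil => simp [prefTable]
  | append_singleton row x ih =>
      rw [List.foldl_append, ih, List.foldl_cons, List.foldl_nil]
      rw [getLast!_prefTable, getLast!_prefTable, prefTable_append, prefTable_append]

theorem prefTable_get (row : List String) (t : String) (j : Nat) (hj : j ≤ row.length) :
    PySem.List.pyGetD (prefTable row t) (j : Int) 0 = ((row.take j).count t : Int) := by
  rw [PySem.List.pyGetD_natCast]
  unfold prefTable
  rw [List.getD_eq_getElem _ _ (by simp; omega)]
  simp

-- a window's count of t is the difference of two prefix-table entries
theorem count_window (row : List String) (t : String) (k : Nat) :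
    ((row.take (min (k + 6) row.length)).count t : Int)
      - ((row.take (min k row.length)).count t : Int)
      = (((row.drop k).take 6).count t : Int) := by
  rw [← List.take_eq_take_min, ← List.take_eq_take_min, List.take_add, List.count_append]
  push_cast; ring

-- A's per-window step equals B's per-window step (on B's intended table contents)
theorem step_eq (row : List String) (player : String) (st : Int × Int) (i : Int) (hi : 0 ≤ i) :
    (let six_tiles := PySem.List.slice row (some i) (some (i + 6))
      if six_tiles.contains (opponent player) = false then
        let player_count : Int := PySem.List.count six_tiles player
        if player_count > st.1 then (player_count, 1)
        else if player_count == st.1 then (st.1, st.2 + 1)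
        else st
      else st)
    = (let s := min i (row.length : Int)
      let e := min (i + 6) (row.length : Int)
      if PySem.List.pyGetD (prefTable row (opponent player)) e 0
           == PySem.List.pyGetD (prefTable row (opponent player)) s 0 then
        let pc := PySem.List.pyGetD (prefTable row player) e 0
                  - PySem.List.pyGetD (prefTable row player) s 0
        if pc > st.1 then (pc, 1)
        else if pc == st.1 then (st.1, st.2 + 1)
        else st
      else st) := by
  obtain ⟨k, rfl⟩ := Int.eq_ofNat_of_zero_le hi
  have hsix : PySem.List.slice row (some (k:Int)) (some ((k:Int) + 6)) = (row.drop k).take 6 := by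
    have h6 : ((k:Int) + 6) = ((k + 6 : Nat) : Int) := by push_cast; ring
    rw [h6, PySem.List.slice_natCast]
    simp
  have hs : min (k:Int) (row.length : Int) = ((min k row.length : Nat) : Int) := by
    simp [Nat.cast_min]
  have he : min ((k:Int) + 6) (row.length : Int) = ((min (k+6) row.length : Nat) : Int) := by
    push_cast [Nat.cast_min]; ring_nf
  simp only [hsix, hs, he,
    prefTable_get row (opponent player) _ (min_le_right _ _),
    prefTable_get row player _ (min_le_right _ _)]
  have hwo := count_window row (opponent player) k
  have hwp := count_window row player k
  by_cases hm : opponent player ∈ (row.drop k).take 6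
  · have hne : ¬ (((row.take (min (k + 6) row.length)).count (opponent player) : Int)
        = ((row.take (min k row.length)).count (opponent player) : Int)) := by
      have h0 : ((row.drop k).take 6).count (opponent player) ≠ 0 := by
        simpa [List.count_eq_zero] using hm
      omega
    simp [hm, hne]
  · have heq : (((row.take (min (k + 6) row.length)).count (opponent player) : Int))
        = ((row.take (min k row.length)).count (opponent player) : Int) := by
      have h0 : ((row.drop k).take 6).count (opponent player) = 0 := by
        simpa [List.count_eq_zero] using hm
      omega
    simp [hm, heq, PySem.List.count_eq]
    rw [hwp]

-- ===== VERDICT (by name: the statement is the Claim_ definition above) =====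
theorem horiz_score_spec : Claim_equal_horiz_score := by
  intro board player _
  unfold Spec_horiz_score horiz_score horiz_score_alt
  simp only []
  have hfold :
      board.foldl (fun (st : Int × Int) row =>
        (PySem.List.pyRange 0 (19 - 5) 1).foldl (fun st i =>
          let six_tiles := PySem.List.slice row (some i) (some (i + 6))
          if six_tiles.contains (opponent player) = false then
            let player_count : Int := PySem.List.count six_tiles player
            if player_count > st.1 then (player_count, 1)
            else if player_count == st.1 then (st.1, st.2 + 1)
            else st
          else st) st) ((0 : Int), (0 : Int))
      = board.foldl (fun (st : Int × Int) row =>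
        let n : Int := row.length
        let prefs : List Int × List Int := row.foldl (fun pr t =>
            (pr.1 ++ [pr.1.getLast! + (if t == player then 1 else 0)],
             pr.2 ++ [pr.2.getLast! + (if t == (if player == "X" then "O" else "X") then 1 else 0)])) ([0], [0])
        (PySem.List.pyRange 0 (19 - 5) 1).foldl (fun st i =>
          let s := min i n
          let e := min (i + 6) n
          if PySem.List.pyGetD prefs.2 e 0 == PySem.List.pyGetD prefs.2 s 0 then
            let pc := PySem.List.pyGetD prefs.1 e 0 - PySem.List.pyGetD prefs.1 s 0
            if pc > st.1 then (pc, 1)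
            else if pc == st.1 then (st.1, st.2 + 1)
            else st
          else st) st) ((0 : Int), (0 : Int)) := by
    apply PySem.List.foldl_congr_mem
    intro st row _
    simp only [prefs_eq row player (if player == "X" then "O" else "X")]
    apply PySem.List.foldl_congr_mem
    intro st' i hi
    have h0 : 0 ≤ i := ((PySem.List.mem_pyRange_one).1 hi).1
    exact step_eq row player st' i h0
  rw [hfold]
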